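-- pv_equiv track=rewrite | github.com/MooN101110/PROJ631 | Projet1_ArbreDecisionnel/arbreDecision.py | donnees_sous_arbre
-- ===== SOURCE A (Python) =====
-- def donnees_sous_arbre(data,attributs_parent):  #Pourrait surement être amélioré (récursive)
--     """retourne la liste des données des sous-arbres ayant les valaurs définies dans attributs parent
--
--     Args:
--         data (liste): liste de dictionnaire
--         attributs_parent (dictionnaire): nom_attribut : valeur
--     """
--     dataSA=[]
--     cles_attr=attributs_parent.keys()
--     for elt in cles_attr:
--         for dict in data :
--             if dict[elt]==attributs_parent[elt]:
--                 dataSA.append(dict)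
--         data=dataSA
--         dataSA=[]
--     return(data)
-- ===== SOURCE B (Python) =====
-- def donnees_sous_arbre(data, attributs_parent):
--     """Single pass over data with an explicit accumulator: a row is kept iff it
--     carries the parent's value for every attribute, the attributes being checked
--     in attributs_parent insertion order (so the short-circuit / KeyError happens
--     on the same key as A's narrowing passes would)."""
--     conditions = list(attributs_parent.items())
--     gardees = []
--     for row in data:
--         ok = True
--         for (cle, valeur) in conditions:
--             if row[cle] != valeur:
--                 ok = False
--                 break
--         if ok:
--             gardees.append(row)
--     return gardees
-- ===== Notes on version B (the rewrite author's own statement) =====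
-- stated objective: simpler
-- what changed: A runs one narrowing pass over the (shrinking) data list per attribute key, rebuilding the survivor list k times; B snapshots the (key,value) conditions once and makes a single explicit-accumulator pass over data, keeping a row iff all conditions hold (checked in the same key order, with break).
import Mathlib
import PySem

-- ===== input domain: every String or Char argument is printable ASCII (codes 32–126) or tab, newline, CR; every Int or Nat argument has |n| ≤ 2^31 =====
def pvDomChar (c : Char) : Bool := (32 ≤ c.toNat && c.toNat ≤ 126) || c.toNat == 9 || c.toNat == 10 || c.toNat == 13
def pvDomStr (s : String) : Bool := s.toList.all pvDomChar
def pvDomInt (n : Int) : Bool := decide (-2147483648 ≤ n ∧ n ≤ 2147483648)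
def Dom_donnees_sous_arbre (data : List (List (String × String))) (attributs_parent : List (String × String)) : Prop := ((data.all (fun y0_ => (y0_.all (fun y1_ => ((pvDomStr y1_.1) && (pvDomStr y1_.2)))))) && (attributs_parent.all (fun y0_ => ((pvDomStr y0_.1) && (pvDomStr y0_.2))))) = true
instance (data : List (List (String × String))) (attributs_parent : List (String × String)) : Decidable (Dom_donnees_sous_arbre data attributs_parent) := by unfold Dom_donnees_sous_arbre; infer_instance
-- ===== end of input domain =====

-- B replaces A's k sequential narrowing passes (one rebuilt survivor list per
-- attribute key) by one recursive pass over data that checks all (key, value)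
-- conditions per row, short-circuiting in the same key order (objective:
-- simpler). Equivalence is about the return value; neither version mutates
-- its arguments.

-- ===== PORT A =====
-- Literal port of A: for each key of attributs_parent, scan the current data,
-- append matching rows to dataSA, then data := dataSA, dataSA := [].
-- dict[elt] is ported as Dict.get?; a none lookup is Python's KeyError,
-- excluded by Pre_.
def donnees_sous_arbre (data : List (List (String × String))) (attributs_parent : List (String × String)) : List (List (String × String)) :=
  let ap := PySem.Dict.ofList attributs_parent
  let cles_attr := PySem.Dict.keys ap
  cles_attr.foldl
    (fun data elt =>
      data.foldl
        (fun dataSA dict =>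
          if (PySem.Dict.ofList dict).get? elt == ap.get? elt then dataSA ++ [dict]
          else dataSA)
        [])
    data

-- ===== PORT B =====
-- Port of B's inner loop: walk the (key, value) conditions, break (return
-- false) at the first mismatch.
def pvMatchRow (row : List (String × String)) : List (String × String) → Bool
  | [] => true
  | (cle, valeur) :: rest =>
      if (PySem.Dict.ofList row).get? cle == some valeur then pvMatchRow row rest
      else false

-- Port of B's outer loop: one pass over data with an accumulator (built here
-- by structural recursion, cons-ing kept rows in order).
def pvGarde (conditions : List (String × String)) : List (List (String × String)) → List (List (String × String))
  | [] => []
  | row :: rest =>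
      if pvMatchRow row conditions then row :: pvGarde conditions rest
      else pvGarde conditions rest

def donnees_sous_arbre_alt (data : List (List (String × String))) (attributs_parent : List (String × String)) : List (List (String × String)) :=
  let conditions := PySem.Dict.items (PySem.Dict.ofList attributs_parent)
  pvGarde conditions data

-- ===== PRECONDITION & SPEC =====
-- Pre_ is exactly the set of inputs on which Python A returns (no KeyError):
-- a row may only lack the j-th attribute key if it already failed to match an
-- earlier key (then both A and B drop it before ever reading the missing key).
def Pre_donnees_sous_arbre (data : List (List (String × String))) (attributs_parent : List (String × String)) : Prop :=
  ∀ row ∈ data, ∀ j, j < (PySem.Dict.keys (PySem.Dict.ofList attributs_parent)).length →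
    (((PySem.Dict.keys (PySem.Dict.ofList attributs_parent)).take j).all
        (fun k => (PySem.Dict.ofList row).get? k == (PySem.Dict.ofList attributs_parent).get? k) = true) →
    ((PySem.Dict.ofList row).get? ((PySem.Dict.keys (PySem.Dict.ofList attributs_parent)).getD j "")).isSome = true
instance (data : List (List (String × String))) (attributs_parent : List (String × String)) : Decidable (Pre_donnees_sous_arbre data attributs_parent) := by unfold Pre_donnees_sous_arbre; infer_instance

def pvWitness_donnees_sous_arbre : (List (List (String × String))) × (List (String × String)) :=
  ([[("a", "1"), ("b", "2")], [("a", "0"), ("b", "2")]], [("a", "1")])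

def Spec_donnees_sous_arbre (data : List (List (String × String))) (attributs_parent : List (String × String)) (out : List (List (String × String))) : Prop := out = donnees_sous_arbre_alt data attributs_parent
instance (data : List (List (String × String))) (attributs_parent : List (String × String)) (out : List (List (String × String))) : Decidable (Spec_donnees_sous_arbre data attributs_parent out) := by unfold Spec_donnees_sous_arbre; infer_instance

-- ===== CLAIM (what is proved, stated in full; the proofs are below) =====
def Claim_equal_donnees_sous_arbre : Prop := ∀ (data : List (List (String × String))) (attributs_parent : List (String × String)), Dom_donnees_sous_arbre data attributs_parent → Pre_donnees_sous_arbre data attributs_parent → Spec_donnees_sous_arbre data attributs_parent (donnees_sous_arbre data attributs_parent)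

-- ===== LEMMAS AND PROOFS =====

theorem pvWitness_ok :
    Dom_donnees_sous_arbre pvWitness_donnees_sous_arbre.1 pvWitness_donnees_sous_arbre.2 ∧
    Pre_donnees_sous_arbre pvWitness_donnees_sous_arbre.1 pvWitness_donnees_sous_arbre.2 := by
  decide

-- B's outer recursion is a filter by B's inner test.
theorem pvGarde_eq_filter (cs : List (String × String)) :
    ∀ data : List (List (String × String)),
      pvGarde cs data = data.filter (fun r => pvMatchRow r cs) := by
  intro data
  induction data with
  | nil => rfl
  | cons r rs ih => simp [pvGarde, ih, List.filter_cons]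

-- B's short-circuiting condition walk equals the all-quantified test, given
-- that every walked pair really is a binding of the dict d.
theorem pvMatchRow_eq_all (row : List (String × String)) (d : PySem.Dict String String) :
    ∀ l : List (String × String), (∀ p ∈ l, d.get? p.1 = some p.2) →
      pvMatchRow row l = l.all (fun p => (PySem.Dict.ofList row).get? p.1 == d.get? p.1) := by
  intro l
  induction l with
  | nil => intro _; rfl
  | cons p ps ih =>
    intro h
    obtain ⟨k, v⟩ := p
    have hk : d.get? k = some v := h (k, v) (List.mem_cons_self)
    simp only [pvMatchRow, List.all_cons, hk]
    rw [ih (fun q hq => h q (List.mem_cons_of_mem _ hq))]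
    by_cases hrow : (PySem.Dict.ofList row).get? k = some v <;> simp [hrow]

-- Iterated narrowing passes equal one filter by the conjunction of the tests.
theorem foldl_filter_eq_filter_all {α : Type} (p : String → α → Bool) :
    ∀ (ks : List String) (l : List α),
      ks.foldl (fun l k => l.filter (p k)) l
        = l.filter (fun d => ks.all (fun k => p k d)) := by
  intro ks
  induction ks with
  | nil => intro l; simp
  | cons k ks ih =>
    intro l
    simp only [List.foldl_cons, ih, List.filter_filter, List.all_cons]
    exact List.filter_congr fun d _ => Bool.and_comm _ _

theorem donnees_sous_arbre_eq_alt (data : List (List (String × String)))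
    (attributs_parent : List (String × String)) :
    donnees_sous_arbre data attributs_parent = donnees_sous_arbre_alt data attributs_parent := by
  unfold donnees_sous_arbre donnees_sous_arbre_alt
  simp only [PySem.List.foldl_append_if_eq_filter, List.nil_append]
  rw [foldl_filter_eq_filter_all, pvGarde_eq_filter]
  apply List.filter_congr
  intro row _
  rw [pvMatchRow_eq_all row (PySem.Dict.ofList attributs_parent) _
        (fun p hp => PySem.Dict.get?_of_mem_items _ hp (PySem.Dict.nodup_keys_ofList _))]
  simp only [PySem.Dict.keys, List.all_map]
  rfl

-- ===== VERDICT (by name: the statement is the Claim_ definition above) =====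
theorem donnees_sous_arbre_spec : Claim_equal_donnees_sous_arbre := by
  intro data attributs_parent _ _
  exact donnees_sous_arbre_eq_alt data attributs_parent
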